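-- pv_equiv track=rewrite | github.com/Paritosh2681/ZenForge | backend/app/services/assessment_generator.py | _plan_question_distribution
-- ===== SOURCE A (Python) =====
-- from typing import Any, Dict, List, Optional
--
-- def _plan_question_distribution(
--
--     num_questions: int,
--     difficulty: str,
--     question_types: Optional[List[str]] = None,
-- ) -> List[Dict[str, str]]:
--     """Plan distribution of question types and difficulties."""
--     if not question_types:
--         question_types = ["multiple_choice", "true_false"]
--
--     if difficulty == "mixed":
--         difficulties: List[str] = []
--         easy_count = int(num_questions * 0.4)
--         medium_count = int(num_questions * 0.4)
--         hard_count = num_questions - easy_count - medium_count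
--
--         difficulties.extend(["easy"] * easy_count)
--         difficulties.extend(["medium"] * medium_count)
--         difficulties.extend(["hard"] * hard_count)
--     else:
--         difficulties = [difficulty] * num_questions
--
--     types_distribution: List[str] = []
--     for i in range(num_questions):
--         types_distribution.append(question_types[i % len(question_types)])
--
--     distribution: List[Dict[str, str]] = []
--     for i in range(num_questions):
--         distribution.append({
--             "type": types_distribution[i],
--             "difficulty": difficulties[i],
--         })
--
--     return distribution
-- ===== SOURCE B (Python) =====
-- from typing import List, Optional
--
--
-- def _plan_question_distribution(
--     num_questions: int,
--     difficulty: str,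
--     question_types: Optional[List[str]] = None,
-- ) -> List[dict]:
--     types = question_types or ["multiple_choice", "true_false"]
--     easy_count = int(num_questions * 0.4)
--     medium_count = int(num_questions * 0.4)
--     plan = [{}] * num_questions
--     for i in range(num_questions):
--         if difficulty == "mixed":
--             if i < easy_count:
--                 d = "easy"
--             elif i < easy_count + medium_count:
--                 d = "medium"
--             else:
--                 d = "hard"
--         else:
--             d = difficulty
--         plan[i] = {"type": types[i % len(types)], "difficulty": d}
--     return plan
-- ===== Notes on version B (the rewrite author's own statement) =====
-- stated objective: simpler
-- what changed: Replaces A's three passes (build a difficulties list, a types list, then zip them into dicts by index) with preallocating the result list once and a single fill-by-index pass that picks each question's type and difficulty directly by threshold comparison, with no intermediate arrays.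
import Mathlib
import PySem

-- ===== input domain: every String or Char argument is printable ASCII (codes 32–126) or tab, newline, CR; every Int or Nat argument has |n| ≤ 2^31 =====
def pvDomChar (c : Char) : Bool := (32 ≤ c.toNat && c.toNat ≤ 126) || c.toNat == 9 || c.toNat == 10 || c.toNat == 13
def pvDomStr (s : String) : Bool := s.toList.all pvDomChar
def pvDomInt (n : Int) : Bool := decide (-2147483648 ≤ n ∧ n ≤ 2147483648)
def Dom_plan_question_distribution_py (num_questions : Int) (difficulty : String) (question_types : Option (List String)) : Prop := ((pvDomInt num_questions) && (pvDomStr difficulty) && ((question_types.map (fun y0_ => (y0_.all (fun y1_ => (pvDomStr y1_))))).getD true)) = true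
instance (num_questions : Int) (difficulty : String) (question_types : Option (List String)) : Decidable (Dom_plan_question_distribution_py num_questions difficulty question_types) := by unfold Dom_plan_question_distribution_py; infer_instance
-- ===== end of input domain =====

-- B fuses A's three passes (difficulties list, types list, zip into dicts) into one
-- streaming loop choosing each question's difficulty by threshold comparison: simpler.


-- int(n * 0.4): exact for |n| ≤ 2^31.  2n/5 is a multiple of 0.2, and the float error of
-- n*0.4 (≤ |n|·1.3e-16 < 3e-7) never crosses a truncation boundary, so int(n*0.4) equals
-- 2n/5 truncated toward zero on the whole domain (checked against CPython).
def pyIntMul04 (n : Int) : Int := Int.tdiv (2 * n) 5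

-- ===== PORT A =====
def plan_question_distribution_py (num_questions : Int) (difficulty : String) (question_types : Option (List String)) : List (List (String × String)) :=
  -- 'if not question_types: question_types = [...]'
  let qt : List String :=
    match question_types with
    | none => ["multiple_choice", "true_false"]
    | some l => if l = [] then ["multiple_choice", "true_false"] else l
  let difficulties : List String :=
    if difficulty = "mixed" then
      let easy_count := pyIntMul04 num_questions
      let medium_count := pyIntMul04 num_questions
      let hard_count := num_questions - easy_count - medium_count
      -- list * k with k possibly negative = [] in Python; Int.toNat clamps the same way
      List.replicate easy_count.toNat "easy" ++ List.replicate medium_count.toNat "medium" ++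
        List.replicate hard_count.toNat "hard"
    else
      List.replicate num_questions.toNat difficulty
  let types_distribution : List String :=
    (PySem.List.pyRange 0 num_questions 1).foldl
      (fun acc i => acc ++ [PySem.List.pyGetD qt (PySem.Int.mod i (qt.length : Int)) ""]) []
  -- index i % len(qt) is always in range (qt ≠ []), so the default "" is never used
  (PySem.List.pyRange 0 num_questions 1).foldl
    (fun acc i => acc ++ [[("type", PySem.List.pyGetD types_distribution i ""),
                           ("difficulty", PySem.List.pyGetD difficulties i "")]]) []

-- ===== PORT B =====
def plan_question_distribution_py_alt (num_questions : Int) (difficulty : String) (question_types : Option (List String)) : List (List (String × String)) :=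
  let types : List String :=
    match question_types with
    | none => ["multiple_choice", "true_false"]
    | some l => if l = [] then ["multiple_choice", "true_false"] else l
  let easy_count := pyIntMul04 num_questions
  let medium_count := pyIntMul04 num_questions
  -- 'plan = [{}] * num_questions' — preallocate; '{}' is the empty dict (negative count = [])
  let plan : List (List (String × String)) := List.replicate num_questions.toNat []
  (PySem.List.pyRange 0 num_questions 1).foldl
    (fun plan i =>
      PySem.List.pySetD plan i
        [("type", PySem.List.pyGetD types (PySem.Int.mod i (types.length : Int)) ""),
         ("difficulty",
            if difficulty = "mixed" then
              if i < easy_count then "easy"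
              else if i < easy_count + medium_count then "medium"
              else "hard"
            else difficulty)]) plan

-- ===== PRECONDITION & SPEC =====
def Spec_plan_question_distribution_py (num_questions : Int) (difficulty : String) (question_types : Option (List String)) (out : List (List (String × String))) : Prop := out = plan_question_distribution_py_alt num_questions difficulty question_types
instance (num_questions : Int) (difficulty : String) (question_types : Option (List String)) (out : List (List (String × String))) : Decidable (Spec_plan_question_distribution_py num_questions difficulty question_types out) := by unfold Spec_plan_question_distribution_py; infer_instance

-- ===== CLAIM (what is proved, stated in full; the proofs are below) =====
def Claim_equal_plan_question_distribution_py : Prop := ∀ (num_questions : Int) (difficulty : String) (question_types : Option (List String)), Dom_plan_question_distribution_py num_questions difficulty question_types → Spec_plan_question_distribution_py num_questions difficulty question_types (plan_question_distribution_py num_questions difficulty question_types)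

-- ===== LEMMAS AND PROOFS =====

-- filling every index of a preallocated list over range(a, n) by pySetD
theorem fill_from {α : Type} (f : Int → α) (n a : Int) (acc : List α)
    (hlen : acc.length = n.toNat) (ha : 0 ≤ a) :
    (PySem.List.pyRange a n 1).foldl (fun acc i => PySem.List.pySetD acc i (f i)) acc
      = acc.take a.toNat ++ (PySem.List.pyRange a n 1).map f := by
  by_cases hab : n ≤ a
  · rw [PySem.List.pyRange_one_eq_nil hab]
    have hle : acc.length ≤ a.toNat := by omega
    simp [List.take_of_length_le hle]
  · rw [PySem.List.pyRange_one_cons (by omega)]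
    simp only [List.foldl_cons, List.map_cons]
    rw [PySem.List.pySetD_of_nonneg _ _ ha]
    rw [fill_from f n (a+1) _ (by simpa using hlen) (by omega)]
    have hset : (acc.set a.toNat (f a)).take (a+1).toNat
        = acc.take a.toNat ++ [f a] := by
      have h1 : (a+1).toNat = a.toNat + 1 := by omega
      rw [h1, List.take_add_one, List.take_set]
      rw [List.set_eq_of_length_le (by simp)]
      rw [List.getElem?_set_self (by omega)]
      rfl
    rw [hset, List.append_assoc, List.singleton_append]
termination_by (n - a).toNat
decreasing_by omega

-- indexing the concatenation of three replicates = threshold comparison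
theorem get_rep3 (a b c : String) (e m h i : Nat)
    (hlen : i < (List.replicate e a ++ List.replicate m b ++ List.replicate h c).length) :
    (List.replicate e a ++ List.replicate m b ++ List.replicate h c)[i] =
      (if i < e then a else if i < e + m then b else c) := by
  by_cases h2 : i < e + m
  · rw [List.getElem_append_left (by simpa using h2)]
    by_cases h1 : i < e
    · rw [List.getElem_append_left (by simpa using h1), List.getElem_replicate]
      simp [h1]
    · rw [List.getElem_append_right (by simpa using h1), List.getElem_replicate]
      simp [h1, h2]
  · rw [List.getElem_append_right (by simp; omega), List.getElem_replicate]
    split_ifs <;> first | rfl | omega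

theorem pyGetD_rep3 (a b c d : String) (e m h i : Int) (h0 : 0 ≤ i) (he : 0 ≤ e) (hm : 0 ≤ m)
    (hi : i < e + m + h) :
    PySem.List.pyGetD (List.replicate e.toNat a ++ List.replicate m.toNat b ++ List.replicate h.toNat c) i d =
      (if i < e then a else if i < e + m then b else c) := by
  rw [PySem.List.pyGetD_eq_getElem _ _ h0 (by simp; omega)]
  rw [get_rep3]
  have h1 : i.toNat < e.toNat ↔ i < e := by omega
  have h2 : i.toNat < e.toNat + m.toNat ↔ i < e + m := by omega
  simp only [h1, h2]

theorem pyGetD_rep (s d : String) (n i : Int) (h0 : 0 ≤ i) (hi : i < n) :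
    PySem.List.pyGetD (List.replicate n.toNat s) i d = s := by
  rw [PySem.List.pyGetD_eq_getElem _ _ h0 (by simp; omega), List.getElem_replicate]

-- ===== VERDICT (by name: the statement is the Claim_ definition above) =====

theorem plan_question_distribution_py_spec : Claim_equal_plan_question_distribution_py := by
  intro n difficulty question_types _
  unfold Spec_plan_question_distribution_py
  unfold plan_question_distribution_py plan_question_distribution_py_alt
  simp only [PySem.List.foldl_append_singleton_eq_map, List.nil_append]
  rw [fill_from _ n 0 _ (by simp) le_rfl]
  simp only [Int.toNat_zero, List.take_zero, List.nil_append]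
  apply List.map_congr_left
  intro i hi
  rw [PySem.List.mem_pyRange_one] at hi
  -- the type component: index the comprehension [qt[j % len qt] for j in range n] at i
  rw [PySem.List.pyGetD_map_pyRange_of_nonneg _ _ _ _ hi.1 hi.2]
  congr 2
  -- the difficulty component
  by_cases hmix : difficulty = "mixed"
  · simp only [if_pos hmix]
    have h0 : (0:Int) ≤ i := hi.1
    have hn : 0 < n := lt_of_le_of_lt h0 hi.2
    have htd : pyIntMul04 n = (2 * n) / 5 := by
      unfold pyIntMul04
      rw [Int.tdiv_eq_ediv]
      simp only [Int.sign_eq_one_of_pos (by omega : (0:Int) < 5)]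
      omega
    have he : (0:Int) ≤ pyIntMul04 n := by rw [htd]; omega
    rw [pyGetD_rep3 _ _ _ _ _ _ _ _ h0 he he (by rw [htd] at *; omega)]
  · simp only [if_neg hmix]
    rw [pyGetD_rep _ _ _ _ hi.1 hi.2]
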